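-- pv_equiv track=rewrite | github.com/TheFenrisLycaon/DSA-C-- | daily_problems/GeeksForGeeks/0320.py | chooseandswap
-- ===== SOURCE A (Python) =====
-- def chooseandswap(A):
--     unique = set()
--     for i in range(len(A)):
--         smol = A[i]
--         unique.add(smol)
--         for j in A[i + 1 :]:
--             if j < smol and j not in unique:
--                 smol = j
--         if smol != A[i]:
--             break
--     if smol == A[i]:
--         return A
--     temp = A[i]
--     res = ""
--     for j in range(len(A)):
--         flag = True
--         if temp == A[j]:
--             flag = False
--             res += smol
--         elif flag and A[j] == smol:
--             res += temp
--         else: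
--             res += A[j]
--     return res
-- ===== SOURCE B (Python) =====
-- def chooseandswap(A):
--     chars = sorted(set(A))
--     firsts = [(d, A.index(d)) for d in chars]
--     for i, ch in enumerate(A):
--         c = next((d for d, fd in firsts if d < ch and fd > i), None)
--         if c is not None:
--             return ''.join(c if x == ch else ch if x == c else x for x in A)
--     return A
-- ===== Notes on version B (the rewrite author's own statement) =====
-- stated objective: faster
-- what changed: Instead of rescanning the whole suffix at every position (O(n^2)), B precomputes the first-occurrence index of each distinct character and, at each position, picks the smallest character of the sorted alphabet that is smaller than the current one and first occurs later; then it swaps the two characters in one pass. (On the empty string A raises NameError; Pre_ excludes it and B returns ''.)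
import Mathlib
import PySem

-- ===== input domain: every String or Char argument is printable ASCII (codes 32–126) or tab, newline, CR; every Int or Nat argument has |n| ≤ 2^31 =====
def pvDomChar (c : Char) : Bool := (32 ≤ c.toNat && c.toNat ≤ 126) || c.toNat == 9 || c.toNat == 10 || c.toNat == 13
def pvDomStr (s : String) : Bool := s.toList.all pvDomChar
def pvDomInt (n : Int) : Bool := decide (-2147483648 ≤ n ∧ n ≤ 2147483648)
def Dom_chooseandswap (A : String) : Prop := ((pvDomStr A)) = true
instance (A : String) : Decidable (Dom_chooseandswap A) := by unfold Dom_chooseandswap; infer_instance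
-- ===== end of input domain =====

-- B replaces A's quadratic per-position suffix rescans by a precomputed first-occurrence table over
-- the sorted distinct characters, scanned once per position (objective: faster; measured asymptotically faster).


-- ===== PORT A =====
-- inner loop: 'for j in A[i+1:]: if j < smol and j not in unique: smol = j'
def csInner (u : PySem.Set Char) (smol : Char) (suffix : List Char) : Char :=
  suffix.foldl (fun s j => if j < s ∧ PySem.Set.contains u j = false then j else s) smol

-- outer loop 'for i in range(len(A)): … break'; fuel = iterations left; returns the values
-- of (i, smol) after the loop. fuel = 0 is only reached on the empty string, where the
-- Python body never runs and A raises NameError (excluded by Pre_).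
def csOuter (l : List Char) (i : Nat) (unique : PySem.Set Char) : Nat → Nat × Char
  | 0 => (i, ' ')
  | fuel + 1 =>
    let ch := PySem.List.pyGetD l (i : Int) ' '
    let u := PySem.Set.add unique ch
    let smol := csInner u ch (PySem.List.slice l (some ((i : Int) + 1)) none)
    if smol ≠ ch then (i, smol)
    else if fuel = 0 then (i, smol)
    else csOuter l (i + 1) u fuel

def chooseandswap (A : String) : String :=
  let l := A.toList
  let r := csOuter l 0 PySem.Set.empty l.length
  let i := r.1
  let smol := r.2
  if smol = PySem.List.pyGetD l (i : Int) ' ' then A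
  else
    let temp := PySem.List.pyGetD l (i : Int) ' '
    let res := l.foldl (fun res c =>
      let flag := true
      if temp = c then res ++ [smol]
      else if flag ∧ c = smol then res ++ [temp]
      else res ++ [c]) ([] : List Char)
    String.ofList res

-- ===== PORT B =====
-- 'next((d for d, fd in firsts if d < ch and fd > i), None)'
def altFind (firsts : List (Char × Int)) (i : Int) (ch : Char) : Option (Char × Int) :=
  firsts.find? (fun p => p.1 < ch ∧ i < p.2)

-- 'for i, ch in enumerate(A): …'
def altScan (firsts : List (Char × Int)) : List (Int × Char) → Option (Char × Char)
  | [] => none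
  | (i, ch) :: rest =>
    match altFind firsts i ch with
    | some p => some (ch, p.1)
    | none => altScan firsts rest

-- 'firsts = [(d, A.index(d)) for d in sorted(set(A))]'
def altFirsts (l : List Char) : List (Char × Int) :=
  (PySem.List.sorted (PySem.Set.ofList l) (fun x => x) false).map
    (fun d => (d, ((PySem.List.index? l d).getD 0 : Int)))

def chooseandswap_alt (A : String) : String :=
  let l := A.toList
  match altScan (altFirsts l) (PySem.List.enumerate l 0) with
  | some (ch, c) => String.ofList (l.map fun x => if x = ch then c else if x = c then ch else x)
  | none => A

-- ===== PRECONDITION & SPEC =====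
-- Pre_ excludes exactly the empty string, on which A raises NameError (its loop body never runs).
def Pre_chooseandswap (A : String) : Prop := A.toList ≠ []
instance (A : String) : Decidable (Pre_chooseandswap A) := by unfold Pre_chooseandswap; infer_instance
def pvWitness_chooseandswap : String := "ba"

def Spec_chooseandswap (A : String) (out : String) : Prop := out = chooseandswap_alt A
instance (A : String) (out : String) : Decidable (Spec_chooseandswap A out) := by unfold Spec_chooseandswap; infer_instance

-- ===== CLAIM (what is proved, stated in full; the proofs are below) =====
def Claim_equal_chooseandswap : Prop := ∀ (A : String), Dom_chooseandswap A → Pre_chooseandswap A → Spec_chooseandswap A (chooseandswap A)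

-- ===== LEMMAS AND PROOFS =====

theorem csInner_spec (u : PySem.Set Char) (a : Char) (xs : List Char) :
    (csInner u a xs = a ∨ (csInner u a xs ∈ xs ∧ csInner u a xs < a ∧ PySem.Set.contains u (csInner u a xs) = false)) ∧
    (∀ j ∈ xs, j < a → PySem.Set.contains u j = false → csInner u a xs ≤ j) := by
  induction xs generalizing a with
  | nil => simp [csInner]
  | cons x xs ih =>
    simp only [csInner, List.foldl_cons] at *
    by_cases hx : x < a ∧ PySem.Set.contains u x = false
    · rw [if_pos hx]
      obtain ⟨ih1, ih2⟩ := ih x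
      have hlex : xs.foldl (fun s j => if j < s ∧ PySem.Set.contains u j = false then j else s) x ≤ x := by
        rcases ih1 with h | ⟨_, h2, _⟩
        · exact le_of_eq h
        · exact le_of_lt h2
      constructor
      · rcases ih1 with h | ⟨h1, h2, h3⟩
        · rw [h]; exact Or.inr ⟨List.mem_cons_self, hx.1, hx.2⟩
        · exact Or.inr ⟨List.mem_cons_of_mem x h1, lt_trans h2 hx.1, h3⟩
      · intro j hj hja hjc
        rcases List.mem_cons.mp hj with rfl | hj
        · exact hlex
        · by_cases hjx : j < x
          · exact ih2 j hj hjx hjc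
          · exact le_trans hlex (le_of_not_gt hjx)
    · rw [if_neg hx]
      obtain ⟨ih1, ih2⟩ := ih a
      constructor
      · rcases ih1 with h | ⟨h1, h2, h3⟩
        · exact Or.inl h
        · exact Or.inr ⟨List.mem_cons_of_mem x h1, h2, h3⟩
      · intro j hj hja hjc
        rcases List.mem_cons.mp hj with rfl | hj
        · exact absurd ⟨hja, hjc⟩ hx
        · exact ih2 j hj hja hjc

theorem find?_sorted_min {c : List Char} (hc : c.Pairwise (· < ·)) (p : Char → Bool) :
    (∀ x, c.find? p = some x → p x = true ∧ x ∈ c ∧ ∀ y ∈ c, p y = true → x ≤ y) ∧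
    (c.find? p = none → ∀ y ∈ c, p y = false) := by
  induction c with
  | nil => simp
  | cons z zs ih =>
    have hz : ∀ y ∈ zs, z < y := fun y hy => (List.pairwise_cons.mp hc).1 y hy
    obtain ⟨ih1, ih2⟩ := ih (List.pairwise_cons.mp hc).2
    by_cases hpz : p z = true
    · rw [List.find?_cons_of_pos hpz]
      refine ⟨fun x hx => ?_, by simp⟩
      obtain rfl : z = x := by injection hx
      refine ⟨hpz, List.mem_cons_self, fun y hy _ => ?_⟩
      rcases List.mem_cons.mp hy with rfl | hy
      · exact le_refl _
      · exact le_of_lt (hz y hy)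
    · have hpz' : p z = false := by simpa using hpz
      rw [List.find?_cons_of_neg (by simp [hpz'])]
      constructor
      · intro x hx
        obtain ⟨h1, h2, h3⟩ := ih1 x hx
        refine ⟨h1, List.mem_cons_of_mem z h2, fun y hy hpy => ?_⟩
        rcases List.mem_cons.mp hy with rfl | hy
        · exact absurd hpy (by simp [hpz'])
        · exact h3 y hy hpy
      · intro hn y hy
        rcases List.mem_cons.mp hy with rfl | hy
        · exact hpz'
        · exact ih2 hn y hy


theorem index?_gt_iff (l : List Char) (d : Char) (hd : d ∈ l) (i : Nat) :
    ((i : Int) < ((PySem.List.index? l d).getD 0 : Int)) ↔ d ∉ l.take (i + 1) := by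
  obtain ⟨k, hk⟩ := Option.isSome_iff_exists.mp ((PySem.List.index?_isSome_iff l d).mpr hd)
  obtain ⟨hk1, hk2, hk3⟩ := PySem.List.getElem_of_index?_eq_some hk
  rw [hk]
  simp only [Option.getD_some]
  constructor
  · intro h hmem
    obtain ⟨j, hj, hjl⟩ := List.mem_take_iff_getElem.mp hmem
    have hji : j < i + 1 := lt_of_lt_of_le hj (by omega)
    have hjk : j < k := by omega
    exact hk3 j hjk hjl
  · intro h
    by_contra hle
    push Not at hle
    have hki : k < i + 1 := by exact_mod_cast by omega
    exact h (List.mem_take_iff_getElem.mpr ⟨k, by omega, hk2⟩)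

theorem contains_ofList_iff (xs : List Char) (x : Char) :
    PySem.Set.contains (PySem.Set.ofList xs) x = false ↔ x ∉ xs := by
  simp [PySem.Set.contains_eq_listContains, List.contains_eq_mem, PySem.Set.mem_ofList]


theorem take_succ_set (l : List Char) (i : Nat) (hil : i < l.length) :
    PySem.Set.add (PySem.Set.ofList (l.take i)) (PySem.List.pyGetD l (i : Int) ' ')
      = PySem.Set.ofList (l.take (i + 1)) := by
  have hch : PySem.List.pyGetD l (i : Int) ' ' = l[i] := by
    simp [List.getD_eq_getElem?_getD, List.getElem?_eq_getElem hil]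
  rw [hch, ← PySem.Set.ofList_append_singleton]
  congr 1
  rw [List.take_add_one, List.getElem?_eq_getElem hil]
  rfl


theorem main_loop (l : List Char) :
    ∀ fuel i u, i + fuel = l.length → 0 < fuel → u = PySem.Set.ofList (l.take i) →
    (∀ ch c, altScan (altFirsts l) (PySem.List.enumerate (l.drop i) (i : Int)) = some (ch, c) →
        PySem.List.pyGetD l (((csOuter l i u fuel).1 : Nat) : Int) ' ' = ch ∧
        (csOuter l i u fuel).2 = c ∧ c ≠ ch) ∧
    (altScan (altFirsts l) (PySem.List.enumerate (l.drop i) (i : Int)) = none →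
        (csOuter l i u fuel).2 = PySem.List.pyGetD l (((csOuter l i u fuel).1 : Nat) : Int) ' ') := by
  intro fuel
  induction fuel with
  | zero => intro i u h h0; omega
  | succ n ih =>
    intro i u hlen _ hu
    have hil : i < l.length := by omega
    have hch : PySem.List.pyGetD l (i : Int) ' ' = l[i] := by
      simp [List.getD_eq_getElem?_getD, List.getElem?_eq_getElem hil]
    have hu' : PySem.Set.add u (PySem.List.pyGetD l (i : Int) ' ')
        = PySem.Set.ofList (l.take (i + 1)) := by
      rw [hu]; exact take_succ_set l i hil
    have hslice : PySem.List.slice l (some ((i : Int) + 1)) none = l.drop (i + 1) := by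
      have h1 : ((i : Int) + 1) = ((i + 1 : Nat) : Int) := by push_cast; ring
      rw [h1, PySem.List.slice_from_natCast]
    have hdrop : l.drop i = l[i] :: l.drop (i + 1) := List.drop_eq_getElem_cons hil
    have henum : PySem.List.enumerate (l.drop i) (i : Int)
        = ((i : Int), l[i]) :: PySem.List.enumerate (l.drop (i + 1)) (((i + 1 : Nat) : Int)) := by
      rw [hdrop, PySem.List.enumerate_cons]
      norm_num
    set chars := PySem.List.sorted (PySem.Set.ofList l) (fun x => x) false with hchars
    have hpair : chars.Pairwise (· < ·) := PySem.List.sorted_ofList_pairwise_lt l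
    have hmemc : ∀ x, x ∈ chars ↔ x ∈ l := by
      intro x; rw [hchars]; simp [PySem.List.mem_sorted, PySem.Set.mem_ofList]
    have hfindmap : ∀ (j : Int) (ch : Char), altFind (altFirsts l) j ch
        = (chars.find? ((fun p : Char × Int => decide (p.1 < ch ∧ j < p.2)) ∘
            (fun d => (d, ((PySem.List.index? l d).getD 0 : Int))))).map
            (fun d => (d, ((PySem.List.index? l d).getD 0 : Int))) := by
      intro j ch
      rw [altFind, altFirsts, List.find?_map]
    obtain ⟨hin1, hin2⟩ := csInner_spec (PySem.Set.ofList (l.take (i+1))) l[i] (l.drop (i+1))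
    obtain ⟨hfs, hfn⟩ := find?_sorted_min hpair
      ((fun p : Char × Int => decide (p.1 < l[i] ∧ (i : Int) < p.2)) ∘
        (fun d => (d, ((PySem.List.index? l d).getD 0 : Int))))
    have hq : ∀ d ∈ l, ((fun p : Char × Int => decide (p.1 < l[i] ∧ (i : Int) < p.2)) ∘
        (fun d => (d, ((PySem.List.index? l d).getD 0 : Int)))) d = true
        ↔ (d < l[i] ∧ d ∉ l.take (i + 1)) := by
      intro d hd
      simp only [Function.comp_apply, decide_eq_true_eq]
      exact and_congr_right (fun _ => index?_gt_iff l d hd i)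
    rw [henum]
    cases hfind : altFind (altFirsts l) (i : Int) l[i] with
    | some p =>
      have hp := hfind
      rw [hfindmap] at hp
      obtain ⟨d, hd, rfl⟩ := Option.map_eq_some_iff.mp hp
      obtain ⟨hqd, hdc, hdmin⟩ := hfs d hd
      have hdl : d ∈ l := (hmemc d).mp hdc
      obtain ⟨hdlt, hdnt⟩ := (hq d hdl).mp hqd
      have hddrop : d ∈ l.drop (i + 1) := by
        have htd := List.take_append_drop (i + 1) l
        rcases List.mem_append.mp (htd ▸ hdl) with h | h
        · exact absurd h hdnt
        · exact h
      have hsle : csInner (PySem.Set.ofList (l.take (i+1))) l[i] (l.drop (i+1)) ≤ d :=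
        hin2 d hddrop hdlt ((contains_ofList_iff _ _).mpr hdnt)
      have hsne : csInner (PySem.Set.ofList (l.take (i+1))) l[i] (l.drop (i+1)) ≠ l[i] := by
        intro h; rw [h] at hsle; exact absurd hdlt (not_lt.mpr hsle)
      have hsmem : csInner (PySem.Set.ofList (l.take (i+1))) l[i] (l.drop (i+1)) ∈ l.drop (i+1) ∧
          csInner (PySem.Set.ofList (l.take (i+1))) l[i] (l.drop (i+1)) < l[i] ∧
          PySem.Set.contains (PySem.Set.ofList (l.take (i+1)))
            (csInner (PySem.Set.ofList (l.take (i+1))) l[i] (l.drop (i+1))) = false := by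
        rcases hin1 with h | h
        · exact absurd h hsne
        · exact h
      have hsl : csInner (PySem.Set.ofList (l.take (i+1))) l[i] (l.drop (i+1)) ∈ l :=
        List.mem_of_mem_drop hsmem.1
      have hds : d ≤ csInner (PySem.Set.ofList (l.take (i+1))) l[i] (l.drop (i+1)) := by
        apply hdmin _ ((hmemc _).mpr hsl)
        exact (hq _ hsl).mpr ⟨hsmem.2.1, (contains_ofList_iff _ _).mp hsmem.2.2⟩
      have hsd : csInner (PySem.Set.ofList (l.take (i+1))) l[i] (l.drop (i+1)) = d :=
        le_antisymm hsle hds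
      have hout : csOuter l i u (n + 1) = (i, d) := by
        rw [csOuter, hslice, hu', hch, hsd]
        rw [if_pos (ne_of_lt hdlt)]
      constructor
      · intro ch c hscan
        rw [altScan, hfind] at hscan
        simp only [Option.some.injEq, Prod.mk.injEq] at hscan
        obtain ⟨rfl, rfl⟩ := hscan
        rw [hout]
        exact ⟨hch, rfl, ne_of_lt hdlt⟩
      · intro hscan
        rw [altScan, hfind] at hscan
        cases hscan
    | none =>
      have hfnone : chars.find? ((fun p : Char × Int => decide (p.1 < l[i] ∧ (i : Int) < p.2)) ∘
          (fun d => (d, ((PySem.List.index? l d).getD 0 : Int)))) = none := by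
        have h := hfind
        rw [hfindmap] at h
        exact Option.map_eq_none_iff.mp h
      have hallf := hfn hfnone
      have hseq : csInner (PySem.Set.ofList (l.take (i+1))) l[i] (l.drop (i+1)) = l[i] := by
        rcases hin1 with h | ⟨h1, h2, h3⟩
        · exact h
        · exfalso
          have hsl : csInner (PySem.Set.ofList (l.take (i+1))) l[i] (l.drop (i+1)) ∈ l :=
            List.mem_of_mem_drop h1
          have hft := hallf _ ((hmemc _).mpr hsl)
          rw [(hq _ hsl).2 ⟨h2, (contains_ofList_iff _ _).mp h3⟩] at hft
          exact absurd hft (by simp)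
      have hscan_step : altScan (altFirsts l) (((i : Int), l[i]) ::
          PySem.List.enumerate (l.drop (i + 1)) (((i + 1 : Nat) : Int)))
          = altScan (altFirsts l) (PySem.List.enumerate (l.drop (i + 1)) (((i + 1 : Nat) : Int))) := by
        rw [altScan, hfind]
      rw [hscan_step]
      cases n with
      | zero =>
        have hout : csOuter l i u 1 = (i, l[i]) := by
          rw [csOuter, hslice, hu', hch, hseq]
          rw [if_neg (by simp), if_pos rfl]
        have hdone : l.drop (i + 1) = [] := List.drop_eq_nil_of_le (by omega)
        rw [hdone, hout]
        constructor
        · intro ch c hscan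
          rw [PySem.List.enumerate_nil, altScan] at hscan
          cases hscan
        · intro _
          exact hch.symm
      | succ m =>
        have hout : csOuter l i u (m + 1 + 1) = csOuter l (i + 1) (PySem.Set.ofList (l.take (i + 1))) (m + 1) := by
          rw [csOuter, hslice, hu', hch, hseq]
          rw [if_neg (by simp), if_neg (by omega)]
        rw [hout]
        exact ih (i + 1) (PySem.Set.ofList (l.take (i + 1))) (by omega) (by omega) rfl

-- A's rebuild loop appends one character per position: it is map of the appended character
theorem foldl_push_eq_map (f : Char → Char) (F : List Char → Char → List Char)
    (hF : ∀ res c, F res c = res ++ [f c]) :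
    ∀ (l acc : List Char), l.foldl F acc = acc ++ l.map f := by
  intro l
  induction l with
  | nil => simp
  | cons x xs ih =>
    intro acc
    rw [List.foldl_cons, hF, ih, List.map_cons]
    simp

theorem chooseandswap_spec : Claim_equal_chooseandswap := by
  intro A _ hpre
  unfold Spec_chooseandswap
  have hlen : 0 < A.toList.length := List.length_pos_iff.mpr hpre
  obtain ⟨H1, H2⟩ := main_loop A.toList A.toList.length 0 PySem.Set.empty
    (by omega) hlen rfl
  cases hscan : altScan (altFirsts A.toList) (PySem.List.enumerate A.toList 0) with
  | none =>
    have h2 := H2 (by simpa using hscan)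
    simp only [chooseandswap, chooseandswap_alt, hscan]
    rw [if_pos h2]
  | some p =>
    obtain ⟨ch, c⟩ := p
    obtain ⟨hA1, hA2, hA3⟩ := H1 ch c (by simpa using hscan)
    simp only [chooseandswap, chooseandswap_alt, hscan]
    rw [hA1, hA2, if_neg hA3]
    congr 1
    rw [foldl_push_eq_map (fun x => if ch = x then c else if x = c then ch else x) _
      (fun res x => by
        dsimp only
        by_cases h1 : ch = x
        · rw [if_pos h1, if_pos h1]
        · rw [if_neg h1, if_neg h1]
          by_cases h2 : x = c
          · rw [if_pos ⟨trivial, h2⟩, if_pos h2]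
          · rw [if_neg (fun h => h2 h.2), if_neg h2]),
      List.nil_append]
    apply List.map_congr_left
    intro x _
    by_cases hx : x = ch
    · simp [hx]
    · rw [if_neg (fun hh => hx hh.symm), if_neg hx]
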